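-- pv_equiv track=rewrite | github.com/francisayyad03/votingSimulator | voting_systems.py | voting_range
-- ===== SOURCE A (Python) =====
-- from typing import List
--
-- def extract_column(data: List[list], column: int) -> list:
--     """Return a list containing only the elements at index column for each
--     sublist in data.
--
--     Pre: each sublist of data has an item at index column.
--
--     >>> extract_column([[1, 2, 3], [4, 5, 6]], 2)
--     [3, 6]
--
--     >>> extract_column([[1, 2, 3], [4, 5, 6], [7,8,9,10]], 1)
--     [2, 5, 8]
--     """
--
--     col = []
--     for row in data:
--         col.append(row[column])
--     return col
--
-- def voting_range(range_ballots: List[List[int]],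
--                  party_order: List[str]) -> List[int]:
--     """Return the total score for each party in range ballots
--     range_ballots, in the order specified in party_order.
--
--     Pre: len of each sublist of range_ballots is len(party_order)
--          the scores in each ballot are specified in the order of party_order
--
--     >>> voting_range([[1, 3, 4, 5], [5, 5, 1, 2], [1, 4, 1, 1]],
--     ...              SAMPLE_ORDER_1)
--     [7, 12, 6, 8]
--
--     >>> voting_range([[1, 2, 3, 4], [3, 2, 1, 0], [5, 4, 3, 1]],
--     ...              SAMPLE_ORDER_1)
--     [9, 8, 7, 5]
--     """
--
--     votes = []
--     count = 0
--     while count < len(party_order):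
--         total = 0
--         data2 = extract_column(range_ballots, count)
--         for item in data2:
--             total += item
--         votes.append(total)
--         count += 1
--     return votes
-- ===== SOURCE B (Python) =====
-- from typing import List
--
-- def voting_range(range_ballots: List[List[int]],
--                  party_order: List[str]) -> List[int]:
--     """Single row-major pass: keep a running totals list and fold each ballot
--     into it, instead of re-scanning all ballots once per party/column."""
--     votes = [0] * len(party_order)
--     for row in range_ballots:
--         votes = [votes[i] + row[i] for i in range(len(party_order))]
--     return votes
-- ===== Notes on version B (the rewrite author's own statement) =====
-- stated objective: simpler
-- what changed: Replaces the per-party column-extraction-and-sum (extract_column called once per party, re-scanning all ballots each time) with a single row-major fold that adds each ballot into a running totals list.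
import Mathlib
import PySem

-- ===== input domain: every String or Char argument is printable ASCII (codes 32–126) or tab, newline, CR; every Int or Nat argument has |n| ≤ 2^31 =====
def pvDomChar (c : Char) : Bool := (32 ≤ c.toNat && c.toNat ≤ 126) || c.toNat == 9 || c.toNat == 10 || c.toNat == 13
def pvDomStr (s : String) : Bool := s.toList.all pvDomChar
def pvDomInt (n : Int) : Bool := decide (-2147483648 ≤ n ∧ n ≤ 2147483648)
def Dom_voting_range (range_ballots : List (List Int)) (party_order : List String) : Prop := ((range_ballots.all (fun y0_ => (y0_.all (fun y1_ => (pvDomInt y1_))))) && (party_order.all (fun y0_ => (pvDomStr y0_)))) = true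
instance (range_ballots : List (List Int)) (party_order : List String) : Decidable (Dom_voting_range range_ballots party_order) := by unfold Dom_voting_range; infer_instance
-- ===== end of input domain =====

-- B replaces A's per-party column extraction with one row-major accumulation pass (objective: simpler).

-- ===== PORT A =====
-- row[column] is in range under Pre_voting_range, so the getD default is never hit there
def extract_column (data : List (List Int)) (column : Int) : List Int :=
  data.foldl (fun col row => col ++ [PySem.List.pyGetD row column 0]) []

def voting_range (range_ballots : List (List Int)) (party_order : List String) : List Int :=
  (PySem.List.pyRange 0 (party_order.length : Int) 1).foldl
    (fun votes count =>
      votes ++ [(extract_column range_ballots count).foldl (· + ·) 0])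
    []

-- ===== PORT B =====
def voting_range_alt (range_ballots : List (List Int)) (party_order : List String) : List Int :=
  range_ballots.foldl
    (fun votes row =>
      (PySem.List.pyRange 0 (party_order.length : Int) 1).map
        (fun i => PySem.List.pyGetD votes i 0 + PySem.List.pyGetD row i 0))
    (List.replicate party_order.length 0)

-- ===== PRECONDITION & SPEC =====
-- A raises IndexError (row[count]) when some ballot is shorter than party_order; exclude exactly those inputs.
def Pre_voting_range (range_ballots : List (List Int)) (party_order : List String) : Prop :=
  ∀ row ∈ range_ballots, party_order.length ≤ row.length
instance (range_ballots : List (List Int)) (party_order : List String) : Decidable (Pre_voting_range range_ballots party_order) := by unfold Pre_voting_range; infer_instance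

def pvWitness_voting_range : List (List Int) × List String := ([[1, 3], [5, 2], [0, 4]], ["a", "b"])

def Spec_voting_range (range_ballots : List (List Int)) (party_order : List String) (out : List Int) : Prop := out = voting_range_alt range_ballots party_order
instance (range_ballots : List (List Int)) (party_order : List String) (out : List Int) : Decidable (Spec_voting_range range_ballots party_order out) := by unfold Spec_voting_range; infer_instance

-- ===== CLAIM (what is proved, stated in full; the proofs are below) =====
def Claim_equal_voting_range : Prop := ∀ (range_ballots : List (List Int)) (party_order : List String), Dom_voting_range range_ballots party_order → Pre_voting_range range_ballots party_order → Spec_voting_range range_ballots party_order (voting_range range_ballots party_order)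

-- ===== LEMMAS AND PROOFS =====

-- the append-singleton foldl is acc ++ map
theorem foldl_append_singleton {α β : Type} (f : α → β) :
    ∀ (L : List α) (acc : List β),
      L.foldl (fun a x => a ++ [f x]) acc = acc ++ L.map f := by
  intro L
  induction L with
  | nil => simp
  | cons x xs ih => intro acc; simp [List.foldl, ih]

theorem foldl_add_eq_sum : ∀ (l : List Int) (a : Int), l.foldl (· + ·) a = a + l.sum := by
  intro l
  induction l with
  | nil => simp
  | cons x xs ih => intro a; simp [List.foldl, ih]; ring

-- A computes, per column c, the sum of row[c] over the rows
theorem voting_range_eq (range_ballots : List (List Int)) (party_order : List String) :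
    voting_range range_ballots party_order =
      (PySem.List.pyRange 0 (party_order.length : Int) 1).map
        (fun c => (range_ballots.map (fun r => PySem.List.pyGetD r c 0)).sum) := by
  unfold voting_range extract_column
  rw [foldl_append_singleton]
  simp only [List.nil_append]
  refine List.map_congr_left (fun c _ => ?_)
  rw [foldl_append_singleton, List.nil_append, foldl_add_eq_sum, zero_add]

-- B's loop invariant: folding rows into a totals list of shape (range n).map g
theorem voting_range_alt_inv (n : Nat) :
    ∀ (rb : List (List Int)) (g : Int → Int),
      rb.foldl
        (fun votes row =>
          (PySem.List.pyRange 0 (n : Int) 1).map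
            (fun i => PySem.List.pyGetD votes i 0 + PySem.List.pyGetD row i 0))
        ((PySem.List.pyRange 0 (n : Int) 1).map g) =
      (PySem.List.pyRange 0 (n : Int) 1).map
        (fun i => g i + (rb.map (fun r => PySem.List.pyGetD r i 0)).sum) := by
  intro rb
  induction rb with
  | nil => intro g; simp
  | cons r rb ih =>
    intro g
    have hstep :
        (PySem.List.pyRange 0 (n : Int) 1).map
          (fun i => PySem.List.pyGetD ((PySem.List.pyRange 0 (n : Int) 1).map g) i 0
                    + PySem.List.pyGetD r i 0) =
        (PySem.List.pyRange 0 (n : Int) 1).map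
          (fun i => g i + PySem.List.pyGetD r i 0) := by
      refine List.map_congr_left (fun i hi => ?_)
      obtain ⟨h0, hn⟩ := (PySem.List.mem_pyRange_one).1 hi
      rw [PySem.List.pyGetD_map_pyRange_of_nonneg g (n : Int) i 0 h0 hn]
    rw [List.foldl_cons, hstep, ih]
    refine List.map_congr_left (fun i _ => ?_)
    simp [add_assoc]

theorem voting_range_alt_eq (range_ballots : List (List Int)) (party_order : List String) :
    voting_range_alt range_ballots party_order =
      (PySem.List.pyRange 0 (party_order.length : Int) 1).map
        (fun c => (range_ballots.map (fun r => PySem.List.pyGetD r c 0)).sum) := by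
  unfold voting_range_alt
  have hrepl : List.replicate party_order.length (0 : Int) =
      (PySem.List.pyRange 0 (party_order.length : Int) 1).map (fun _ => 0) := by
    rw [List.map_const', PySem.List.length_pyRange_one]
    simp
  rw [hrepl, voting_range_alt_inv party_order.length range_ballots (fun _ => 0)]
  simp

-- ===== VERDICT (by name: the statement is the Claim_ definition above) =====
theorem voting_range_spec : Claim_equal_voting_range := by
  intro rb po _ _
  unfold Spec_voting_range
  rw [voting_range_eq, voting_range_alt_eq]
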